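-- pv_equiv track=rewrite | github.com/KarahanS/Cross-Time-Self-Distillation | data/VidOR/build_dataset_vidvrd.py | has_common_track
-- ===== SOURCE A (Python) =====
-- from typing import Dict, List, Set, Tuple, Iterable, Optional
--
-- def has_common_track(tracks: Dict[int, Set[int]], frames: List[int]) -> bool:
--     """True iff there is at least one track-id visible in *all* frames."""
--     common: Optional[Set[int]] = None
--     for f in frames:
--         tids = tracks.get(f, set())
--         common = tids if common is None else common & tids
--         if not common:
--             return False
--     return True
-- ===== SOURCE B (Python) =====
-- from typing import Dict, List, Set, Optional
--
-- def has_common_track(tracks: Dict[int, Set[int]], frames: List[int]) -> bool: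
--     """True iff there is at least one track-id visible in *all* frames."""
--     if not frames:
--         return True
--     counts: Dict[int, int] = {}
--     for f in frames:
--         for t in tracks.get(f, set()):
--             counts[t] = counts.get(t, 0) + 1
--     n = len(frames)
--     return any(c == n for c in counts.values())
-- ===== Notes on version B (the rewrite author's own statement) =====
-- stated objective: alternative
-- what changed: Replaces A's progressive set-intersection with early exit by a single counting pass: build a frequency table of track-id visibility per frame occurrence, then return True iff some count equals len(frames).
import Mathlib
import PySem

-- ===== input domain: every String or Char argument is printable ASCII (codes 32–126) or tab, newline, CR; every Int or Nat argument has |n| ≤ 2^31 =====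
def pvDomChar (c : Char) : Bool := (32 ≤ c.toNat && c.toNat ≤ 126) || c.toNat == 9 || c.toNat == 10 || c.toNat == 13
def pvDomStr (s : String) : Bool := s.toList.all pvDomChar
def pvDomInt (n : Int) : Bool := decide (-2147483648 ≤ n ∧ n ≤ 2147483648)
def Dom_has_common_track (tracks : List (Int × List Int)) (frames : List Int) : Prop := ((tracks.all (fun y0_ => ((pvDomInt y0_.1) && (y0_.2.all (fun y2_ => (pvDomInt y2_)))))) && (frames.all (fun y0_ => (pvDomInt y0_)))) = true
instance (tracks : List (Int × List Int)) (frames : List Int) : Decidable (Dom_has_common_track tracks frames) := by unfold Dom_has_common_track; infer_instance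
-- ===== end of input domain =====

-- B replaces A's progressive set-intersection (with early exit) by a counting pass over all
-- frame occurrences followed by a scan for a count equal to len(frames); alternative, not faster.


-- ===== PORT A =====
-- A's loop: 'common' is None or the current candidate set; early return False when it empties
def hctLoop (tracks : List (Int × List Int)) (common : Option (List Int)) : List Int → Bool
  | [] => true
  | f :: rest =>
      let tids := (PySem.Dict.mk tracks).getD f []
      let c := match common with
        | none => tids
        | some c0 => PySem.Set.inter c0 tids
      if c.isEmpty then false else hctLoop tracks (some c) rest

def has_common_track (tracks : List (Int × List Int)) (frames : List Int) : Bool :=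
  hctLoop tracks none frames

-- ===== PORT B =====
def has_common_track_alt (tracks : List (Int × List Int)) (frames : List Int) : Bool :=
  if frames.isEmpty then true
  else
    let counts := frames.foldl
      (fun d f => ((PySem.Dict.mk tracks).getD f []).foldl
        (fun d t => d.insert t (d.getD t 0 + 1)) d)
      PySem.Dict.empty
    let n : Int := frames.length
    counts.values.any (fun c => c == n)

-- ===== PRECONDITION & SPEC =====
-- Pre_ states the set-representation invariant of the type convention (each dict value is a
-- Python set, so its list holds distinct elements); it excludes no input the Python A accepts.
def pvNodupB : List Int → Bool
  | [] => true
  | x :: xs => (!(decide (x ∈ xs))) && pvNodupB xs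

def Pre_has_common_track (tracks : List (Int × List Int)) (frames : List Int) : Prop :=
  tracks.all (fun p => pvNodupB p.2) = true
instance (tracks : List (Int × List Int)) (frames : List Int) : Decidable (Pre_has_common_track tracks frames) := by unfold Pre_has_common_track; infer_instance

def pvWitness_has_common_track : (List (Int × List Int)) × List Int :=
  ([(0, [1]), (1, [1, 2])], [0, 1])

def Spec_has_common_track (tracks : List (Int × List Int)) (frames : List Int) (out : Bool) : Prop := out = has_common_track_alt tracks frames
instance (tracks : List (Int × List Int)) (frames : List Int) (out : Bool) : Decidable (Spec_has_common_track tracks frames out) := by unfold Spec_has_common_track; infer_instance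

-- ===== CLAIM (what is proved, stated in full; the proofs are below) =====
def Claim_equal_has_common_track : Prop := ∀ (tracks : List (Int × List Int)) (frames : List Int), Dom_has_common_track tracks frames → Pre_has_common_track tracks frames → Spec_has_common_track tracks frames (has_common_track tracks frames)

-- ===== LEMMAS AND PROOFS =====

lemma pvNodupB_iff (l : List Int) : pvNodupB l = true ↔ l.Nodup := by
  induction l with
  | nil => simp [pvNodupB]
  | cons x xs ih => simp [pvNodupB, List.nodup_cons, ih]

-- each dict value is Nodup under Pre_
lemma nodup_getD (tracks : List (Int × List Int)) (hpre : ∀ p ∈ tracks, p.2.Nodup) (f : Int) :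
    ((PySem.Dict.mk tracks).getD f []).Nodup := by
  rw [PySem.Dict.getD_eq_get?_getD]
  cases h : (PySem.Dict.mk tracks).get? f with
  | none => simp
  | some v =>
      have hm := PySem.Dict.mem_items_of_get?_eq_some _ h
      simpa using hpre _ hm

-- A's loop, started on a nonempty candidate set, succeeds iff some candidate is in every remaining frame
lemma hctLoop_some_iff (tracks : List (Int × List Int)) (rest : List Int) :
    ∀ (c : List Int), c ≠ [] →
    (hctLoop tracks (some c) rest = true ↔
      ∃ t ∈ c, ∀ f ∈ rest, t ∈ (PySem.Dict.mk tracks).getD f []) := by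
  induction rest with
  | nil =>
      intro c hc
      simpa [hctLoop] using List.exists_mem_of_ne_nil c hc
  | cons f rest ih =>
      intro c hc
      simp only [hctLoop]
      by_cases hemp : (PySem.Set.inter c ((PySem.Dict.mk tracks).getD f [])).isEmpty
      · have hnil := List.isEmpty_iff.mp hemp
        simp only [hemp, if_true]
        constructor
        · intro h; cases h
        · rintro ⟨t, htc, hall⟩
          have htf : t ∈ (PySem.Dict.mk tracks).getD f [] := hall f (by simp)
          have : t ∈ PySem.Set.inter c ((PySem.Dict.mk tracks).getD f []) :=
            (PySem.Set.mem_inter _ _ _).mpr ⟨htc, htf⟩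
          rw [hnil] at this
          cases this
      · have hne : PySem.Set.inter c ((PySem.Dict.mk tracks).getD f []) ≠ [] := by
          intro h; rw [h] at hemp; simp at hemp
        simp only [hemp, Bool.false_eq_true, if_false]
        rw [ih _ hne]
        constructor
        · rintro ⟨t, htc, hall⟩
          obtain ⟨h1, h2⟩ := (PySem.Set.mem_inter _ _ _).mp htc
          exact ⟨t, h1, by
            intro g hg
            rcases List.mem_cons.mp hg with hg | hg
            · rw [hg]; exact h2
            · exact hall g hg⟩
        · rintro ⟨t, htc, hall⟩
          refine ⟨t, (PySem.Set.mem_inter _ _ _).mpr ⟨htc, hall f (by simp)⟩, ?_⟩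
          intro g hg; exact hall g (List.mem_cons.mpr (Or.inr hg))

-- A succeeds iff frames is empty or some id is visible in every frame
lemma hct_iff (tracks : List (Int × List Int)) (frames : List Int) :
    has_common_track tracks frames = true ↔
      (frames = [] ∨ ∃ t, ∀ f ∈ frames, t ∈ (PySem.Dict.mk tracks).getD f []) := by
  cases frames with
  | nil => simp [has_common_track, hctLoop]
  | cons f rest =>
      unfold has_common_track
      simp only [hctLoop]
      by_cases hemp : ((PySem.Dict.mk tracks).getD f []).isEmpty
      · have hnil := List.isEmpty_iff.mp hemp
        simp only [hemp, if_true]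
        constructor
        · intro h; cases h
        · rintro (h | ⟨t, hall⟩)
          · cases h
          · have := hall f (by simp)
            rw [hnil] at this; cases this
      · have hne : (PySem.Dict.mk tracks).getD f [] ≠ [] := by
          intro h; rw [h] at hemp; simp at hemp
        simp only [hemp, Bool.false_eq_true, if_false]
        rw [hctLoop_some_iff tracks rest _ hne]
        constructor
        · rintro ⟨t, htf, hall⟩
          refine Or.inr ⟨t, ?_⟩
          intro g hg
          rcases List.mem_cons.mp hg with hg | hg
          · rw [hg]; exact htf
          · exact hall g hg
        · rintro (h | ⟨t, hall⟩)
          · cases h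
          · exact ⟨t, hall f (by simp), fun g hg => hall g (List.mem_cons.mpr (Or.inr hg))⟩

-- per-occurrence counts: total ≤ len(frames), with equality iff visible in every frame
lemma count_flatMap_iff (get : Int → List Int) (k : Int)
    (h1 : ∀ f, (get f).count k ≤ 1) :
    ∀ frames : List Int,
      (frames.flatMap get).count k ≤ frames.length ∧
      ((frames.flatMap get).count k = frames.length ↔ ∀ f ∈ frames, k ∈ get f) := by
  intro frames
  induction frames with
  | nil => simp
  | cons f rest ih =>
      obtain ⟨ihle, ihiff⟩ := ih
      have hcf := h1 f
      constructor
      · simp only [List.flatMap_cons, List.count_append, List.length_cons]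
        omega
      · simp only [List.flatMap_cons, List.count_append, List.length_cons,
          List.forall_mem_cons]
        constructor
        · intro h
          have h2 : (rest.flatMap get).count k = rest.length ∧ (get f).count k = 1 := by omega
          exact ⟨List.count_pos_iff.mp (by omega), ihiff.mp h2.1⟩
        · rintro ⟨hm, hall⟩
          have hp : 0 < (get f).count k := List.count_pos_iff.mpr hm
          have := ihiff.mpr hall
          omega

-- the nested counting loop is a single loop over the concatenation of the per-frame id lists
lemma foldl_foldl_flatMap {α β : Type} (get : Int → List α) (step : β → α → β) :
    ∀ (frames : List Int) (d : β),
      frames.foldl (fun d f => (get f).foldl step d) d = (frames.flatMap get).foldl step d := by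
  intro frames
  induction frames with
  | nil => intro d; rfl
  | cons f rest ih =>
      intro d
      simp only [List.foldl_cons, List.flatMap_cons, List.foldl_append]
      exact ih _

-- the counting scan, for per-frame distinct ids, finds an id iff some id is in every frame
lemma countScan_iff (get : Int → List Int) (frames : List Int) (hfe : frames ≠ [])
    (hnods : ∀ f (t : Int), (get f).count t ≤ 1) :
    (((frames.flatMap get).foldl (fun (d : PySem.Dict Int Int) t => d.insert t (d.getD t 0 + 1))
        PySem.Dict.empty).values.any (fun c => c == (frames.length : Int))) = true
      ↔ ∃ t, ∀ f ∈ frames, t ∈ get f := by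
  have hkeys : ((frames.flatMap get).foldl
      (fun (d : PySem.Dict Int Int) t => d.insert t (d.getD t 0 + 1)) PySem.Dict.empty).keys
      = PySem.Set.ofList (frames.flatMap get) := by
    rw [PySem.Dict.keys_foldl_insert (frames.flatMap get) (fun d x => d.getD x 0 + 1)
      PySem.Dict.empty]
    rfl
  have hgetc : ∀ t : Int, ((frames.flatMap get).foldl
      (fun (d : PySem.Dict Int Int) t => d.insert t (d.getD t 0 + 1)) PySem.Dict.empty).getD t 0
      = ((frames.flatMap get).count t : Int) := by
    intro t
    rw [PySem.Dict.getD_foldl_insert_add_one (frames.flatMap get) PySem.Dict.empty t]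
    simp
  rw [PySem.Dict.values_eq_map_keys _ (by rw [hkeys]; exact PySem.Set.nodup_ofList _) 0,
    List.any_map, List.any_eq_true]
  constructor
  · rintro ⟨t, htk, hval⟩
    simp only [Function.comp_apply, hgetc, beq_iff_eq, Nat.cast_inj] at hval
    exact ⟨t, (count_flatMap_iff get t (fun f => hnods f t) frames).2.mp hval⟩
  · rintro ⟨t, hall⟩
    have hcnt := (count_flatMap_iff get t (fun f => hnods f t) frames).2.mpr hall
    obtain ⟨f0, rest0, hfr⟩ := List.exists_cons_of_ne_nil hfe
    have htx : t ∈ frames.flatMap get :=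
      List.mem_flatMap.mpr ⟨f0, by rw [hfr]; simp, hall f0 (by rw [hfr]; simp)⟩
    refine ⟨t, ?_, ?_⟩
    · rw [hkeys]
      simpa [PySem.Set.mem_ofList] using htx
    · simp only [Function.comp_apply, hgetc, hcnt, beq_iff_eq]

-- B succeeds iff frames is empty or some id is visible in every frame
lemma hct_alt_iff (tracks : List (Int × List Int)) (frames : List Int)
    (hpre : ∀ p ∈ tracks, p.2.Nodup) :
    has_common_track_alt tracks frames = true ↔
      (frames = [] ∨ ∃ t, ∀ f ∈ frames, t ∈ (PySem.Dict.mk tracks).getD f []) := by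
  unfold has_common_track_alt
  by_cases hfe : frames = []
  · subst hfe; simp
  · rw [if_neg (by simpa [List.isEmpty_iff] using hfe)]
    rw [foldl_foldl_flatMap (fun f => (PySem.Dict.mk tracks).getD f [])
      (fun (d : PySem.Dict Int Int) t => d.insert t (d.getD t 0 + 1)) frames PySem.Dict.empty]
    rw [countScan_iff (fun f => (PySem.Dict.mk tracks).getD f []) frames hfe
      (fun f t => List.nodup_iff_count_le_one.mp (nodup_getD tracks hpre f) t)]
    simp [hfe]

-- ===== VERDICT (by name: the statement is the Claim_ definition above) =====
theorem has_common_track_spec : Claim_equal_has_common_track := by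
  intro tracks frames _ hpre
  have hpre' : ∀ p ∈ tracks, p.2.Nodup := fun p hp =>
    (pvNodupB_iff p.2).mp (List.all_eq_true.mp hpre p hp)
  unfold Spec_has_common_track
  rw [Bool.eq_iff_iff, hct_iff, hct_alt_iff tracks frames hpre']
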